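-- pv_equiv track=rewrite | github.com/SunwoongH/algorithm | Programmers/CodeChallenge/택배 상자 꺼내기.py | solution
-- ===== SOURCE A (Python) =====
-- def solution(n, w, num):
--     sequence = 1
--     box = []
--     floor, count = divmod(n, w)
--     for i in range(floor):
--         nums = list(range(sequence, sequence + w))
--         if i % 2 != 0:
--             nums.reverse()
--         box.append(nums)
--         sequence += w
--     if count > 0:
--         nums = list(range(sequence, sequence + count)) + [0 for _ in range(w - count)]
--         if floor % 2 != 0:
--             nums.reverse()
--         box.append(nums)
--     box.reverse()
--
--     for c in range(w):
--         depth = 0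
--         for r in range(floor if count == 0 else floor + 1):
--             if box[r][c] != 0:
--                 depth += 1
--             if box[r][c] == num:
--                 return depth
-- ===== SOURCE B (Python) =====
-- def solution(n, w, num):
--     if w <= 0 or num < 0 or num > n:
--         return None  # no such box
--     if num == 0:
--         return 0  # boxes are numbered 1..n: nothing to remove
--     floor, count = divmod(n, w)
--     r, k = divmod(num - 1, w)
--     c = k if r % 2 == 0 else w - 1 - k
--     depth = floor - r if r < floor else 0
--     if count > 0:
--         pos = c if floor % 2 == 0 else w - 1 - c
--         if pos < count:
--             depth += 1
--     return depth
-- ===== Notes on version B (the rewrite author's own statement) =====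
-- stated objective: faster
-- what changed: B replaces building the whole zigzag grid and scanning it column by column with O(1) arithmetic: it computes num's row/column from divmod(num-1, w) and counts the boxes above it directly (full rows plus a conditional top partial row), returning 0 for num=0 since no box is numbered 0.
-- outside the precondition, e.g. on solution(2, 1, 0): A returns None, B returns 0; on solution(-1, -1, -1): A returns None, B returns None; on solution(5, 3, 7): A returns None, B returns None
import Mathlib
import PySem

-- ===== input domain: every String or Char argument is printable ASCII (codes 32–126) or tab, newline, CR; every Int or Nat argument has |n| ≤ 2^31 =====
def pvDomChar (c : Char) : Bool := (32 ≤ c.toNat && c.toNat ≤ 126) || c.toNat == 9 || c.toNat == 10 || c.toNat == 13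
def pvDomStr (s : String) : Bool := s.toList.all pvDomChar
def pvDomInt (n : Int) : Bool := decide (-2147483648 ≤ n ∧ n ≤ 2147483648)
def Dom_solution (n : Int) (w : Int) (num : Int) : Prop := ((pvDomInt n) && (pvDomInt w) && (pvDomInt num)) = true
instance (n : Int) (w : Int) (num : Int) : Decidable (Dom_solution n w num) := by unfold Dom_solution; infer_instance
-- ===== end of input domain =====

-- B replaces A's grid construction and column-by-column scan by O(1) row/column arithmetic; equivalence is proved on Pre_ (exactly the inputs where A returns an int).

-- ===== PORT A =====
-- inner loop 'for r in range(R): …' with its early return (Python reads box[r][c] twice, as here);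
-- box[r][c] is in range on every input Pre_ admits, so pyGetD's default is never used there
def rowScan (box : List (List Int)) (num c : Int) (rs : List Int) (depth : Int) : Option Int :=
  match rs with
  | [] => none
  | r :: rest =>
    if PySem.List.pyGetD (PySem.List.pyGetD box r []) c 0 = num then
      some (if PySem.List.pyGetD (PySem.List.pyGetD box r []) c 0 ≠ 0 then depth + 1 else depth)
    else
      rowScan box num c rest
        (if PySem.List.pyGetD (PySem.List.pyGetD box r []) c 0 ≠ 0 then depth + 1 else depth)

-- outer loop 'for c in range(w): …'
def colScan (box : List (List Int)) (num R : Int) (cs : List Int) : Option Int :=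
  match cs with
  | [] => none
  | c :: rest =>
    match rowScan box num c (PySem.List.pyRange 0 R) 0 with
    | some d => some d
    | none => colScan box num R rest

def solution (n : Int) (w : Int) (num : Int) : Int :=
  match PySem.Int.divmod? n w with
  | none => 0  -- w = 0: the Python raises ZeroDivisionError (outside Pre_)
  | some (floor, count) =>
    let st := (PySem.List.pyRange 0 floor).foldl
      (fun (st : Int × List (List Int)) i =>
        (st.1 + w,
         st.2 ++ [if PySem.Int.mod i 2 ≠ 0 then (PySem.List.pyRange st.1 (st.1 + w)).reverse
                  else PySem.List.pyRange st.1 (st.1 + w)]))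
      (1, ([] : List (List Int)))
    let box := if count > 0 then
        st.2 ++ [if PySem.Int.mod floor 2 ≠ 0 then
                   (PySem.List.pyRange st.1 (st.1 + count)
                     ++ (List.range (w - count).toNat).map (fun _ => (0 : Int))).reverse
                 else
                   PySem.List.pyRange st.1 (st.1 + count)
                     ++ (List.range (w - count).toNat).map (fun _ => (0 : Int))]
      else st.2
    match colScan box.reverse num (if count = 0 then floor else floor + 1) (PySem.List.pyRange 0 w) with
    | some d => d
    | none => 0  -- the Python returns None here (outside Pre_)

-- ===== PORT B =====
def solution_alt (n : Int) (w : Int) (num : Int) : Int :=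
  if w ≤ 0 ∨ num < 0 ∨ num > n then 0  -- Python B returns None here (outside Pre_)
  else if num = 0 then 0  -- boxes are numbered 1..n: nothing to remove
  else match PySem.Int.divmod? n w, PySem.Int.divmod? (num - 1) w with
  | some (floor, count), some (r, k) =>
    let c := if PySem.Int.mod r 2 = 0 then k else w - 1 - k
    let depth := if r < floor then floor - r else 0
    if count > 0 then
      if (if PySem.Int.mod floor 2 = 0 then c else w - 1 - c) < count then depth + 1 else depth
    else depth
  | _, _ => 0  -- w = 0: ZeroDivisionError (outside Pre_)

-- ===== PRECONDITION & SPEC =====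
-- Pre_ excludes exactly the inputs where the Python A returns no int: w ≤ 0 (ZeroDivisionError for
-- w = 0, None for w < 0), num < 0 or num > n (None), and num = 0 with n divisible by w (None).
def Pre_solution (n : Int) (w : Int) (num : Int) : Prop :=
  1 ≤ w ∧ 0 ≤ num ∧ num ≤ n ∧ (num = 0 → PySem.Int.mod n w ≠ 0)
instance (n : Int) (w : Int) (num : Int) : Decidable (Pre_solution n w num) := by unfold Pre_solution; infer_instance
def pvWitness_solution : Int × Int × Int := (6, 2, 3)
def Spec_solution (n : Int) (w : Int) (num : Int) (out : Int) : Prop := out = solution_alt n w num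
instance (n : Int) (w : Int) (num : Int) (out : Int) : Decidable (Spec_solution n w num out) := by unfold Spec_solution; infer_instance

-- ===== CLAIM (what is proved, stated in full; the proofs are below) =====
def Claim_equal_solution : Prop := ∀ (n : Int) (w : Int) (num : Int), Dom_solution n w num → Pre_solution n w num → Spec_solution n w num (solution n w num)

-- ===== LEMMAS AND PROOFS =====

-- a full zigzag row: row i (0-based from the bottom) holds i*w+1 .. i*w+w, reversed when i is odd
def segRow (w : Int) (i : Nat) : List Int := PySem.List.pyRange ((i : Int) * w + 1) ((i : Int) * w + 1 + w)
def rowAt (w : Int) (i : Nat) : List Int := if i % 2 = 0 then segRow w i else (segRow w i).reverse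

-- the partial top row, as A builds it
def prow (w floor count : Int) : List Int :=
  if PySem.Int.mod floor 2 ≠ 0 then
    (PySem.List.pyRange (floor * w + 1) (floor * w + 1 + count)
      ++ (List.range (w - count).toNat).map (fun _ => (0 : Int))).reverse
  else
    PySem.List.pyRange (floor * w + 1) (floor * w + 1 + count)
      ++ (List.range (w - count).toNat).map (fun _ => (0 : Int))

def gridRows (w floor count : Int) : List (List Int) :=
  (List.range floor.toNat).map (rowAt w) ++ (if 0 < count then [prow w floor count] else [])

lemma buildA (w : Int) (F : Nat) :
    (PySem.List.pyRange 0 (F : Int)).foldl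
      (fun (st : Int × List (List Int)) i =>
        (st.1 + w,
         st.2 ++ [if PySem.Int.mod i 2 ≠ 0 then (PySem.List.pyRange st.1 (st.1 + w)).reverse
                  else PySem.List.pyRange st.1 (st.1 + w)]))
      (1, ([] : List (List Int)))
    = ((F : Int) * w + 1, (List.range F).map (rowAt w)) := by
  induction F with
  | zero => simp [PySem.List.pyRange_one_eq_nil (by omega : (0:Int) ≤ 0)]
  | succ F ih =>
    have hcast : ((F + 1 : Nat) : Int) = (F : Int) + 1 := by push_cast; ring
    rw [hcast, PySem.List.pyRange_one_succ_right (by positivity), List.foldl_append, ih,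
      List.range_succ, List.map_append]
    have h1 : (F : Int) * w + 1 + w = ((F : Int) + 1) * w + 1 := by ring
    rw [List.foldl_cons, List.foldl_nil]
    have hm : PySem.Int.mod ((F : Nat) : Int) 2 = ((F % 2 : Nat) : Int) := PySem.Int.mod_natCast F 2
    by_cases hp : F % 2 = 0 <;>
      simp [hp, rowAt, segRow, h1] <;>
      (intro habs; exfalso; omega)

lemma div_unique {w a b x y : Int} (hw : 0 < w) (hx : 0 ≤ x) (hxw : x < w) (hy : 0 ≤ y) (hyw : y < w)
    (h : a * w + x = b * w + y) : a = b ∧ x = y := by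
  have h1 : (a * w + x) / w = a := by
    rw [add_comm, Int.add_mul_ediv_right _ _ (by omega : w ≠ 0), Int.ediv_eq_zero_of_lt hx hxw, zero_add]
  have h2 : (b * w + y) / w = b := by
    rw [add_comm, Int.add_mul_ediv_right _ _ (by omega : w ≠ 0), Int.ediv_eq_zero_of_lt hy hyw, zero_add]
  have hab : a = b := by rw [← h1, h, h2]
  refine ⟨hab, ?_⟩
  subst hab
  exact add_left_cancel h

lemma getD_reverse (l : List Int) (j : Nat) (hj : j < l.length) :
    l.reverse.getD j 0 = l.getD (l.length - 1 - j) 0 := by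
  rw [List.getD_eq_getElem _ _ (by simpa using hj), List.getElem_reverse,
    List.getD_eq_getElem _ _ (by omega)]

lemma rowAt_getD (w : Int) (hw : 1 ≤ w) (i c : Nat) (hc : (c : Int) < w) :
    (rowAt w i).getD c 0 = if i % 2 = 0 then (i : Int) * w + 1 + c else (i : Int) * w + w - c := by
  have hsub : ((i : Int) * w + 1 + w) - ((i : Int) * w + 1) = w := by ring
  have hcl : c < (PySem.List.pyRange ((i : Int) * w + 1) ((i : Int) * w + 1 + w)).length := by
    rw [PySem.List.length_pyRange_one, hsub]; omega
  unfold rowAt segRow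
  by_cases hp : i % 2 = 0
  · rw [if_pos hp, if_pos hp, List.getD_eq_getElem _ _ hcl, PySem.List.getElem_pyRange_one]
  · rw [if_neg hp, if_neg hp, getD_reverse _ _ hcl, List.getD_eq_getElem _ _ (by omega),
      PySem.List.getElem_pyRange_one]
    have hcast : (((PySem.List.pyRange ((i : Int) * w + 1) ((i : Int) * w + 1 + w)).length - 1 - c : Nat) : Int)
        = w - 1 - (c : Int) := by
      rw [PySem.List.length_pyRange_one, hsub]; omega
    rw [hcast]; ring

lemma zeros_getD (m j : Nat) : ((List.range m).map (fun _ => (0 : Int))).getD j 0 = 0 := by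
  by_cases hj : j < m
  · rw [List.getD_eq_getElem _ _ (by simpa using hj)]; simp
  · rw [List.getD_eq_default _ _ (by simpa using Nat.le_of_not_lt hj)]

lemma prow_getD (w floor count : Int) (hw : 1 ≤ w) (hc0 : 0 < count) (hcw : count ≤ w)
    (c : Nat) (hc : (c : Int) < w) :
    (prow w floor count).getD c 0 =
      if PySem.Int.mod floor 2 = 0 then (if (c : Int) < count then floor * w + 1 + c else 0)
      else (if w - 1 - c < count then floor * w + 1 + (w - 1 - c) else 0) := by
  have hsub : (floor * w + 1 + count) - (floor * w + 1) = count := by ring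
  have hlenp : (PySem.List.pyRange (floor * w + 1) (floor * w + 1 + count)).length = count.toNat := by
    rw [PySem.List.length_pyRange_one, hsub]
  have hnum : ∀ j : Nat, (j : Int) < w →
      ((PySem.List.pyRange (floor * w + 1) (floor * w + 1 + count)
        ++ (List.range (w - count).toNat).map (fun _ => (0 : Int))).getD j 0)
      = if (j : Int) < count then floor * w + 1 + j else 0 := by
    intro j hj
    by_cases hjc : (j : Int) < count
    · rw [List.getD_append _ _ _ _ (by rw [hlenp]; omega),
        List.getD_eq_getElem _ _ (by rw [hlenp]; omega),
        PySem.List.getElem_pyRange_one, if_pos hjc]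
    · rw [List.getD_append_right _ _ _ _ (by rw [hlenp]; omega), zeros_getD, if_neg hjc]
  have hlen : (PySem.List.pyRange (floor * w + 1) (floor * w + 1 + count)
        ++ (List.range (w - count).toNat).map (fun _ => (0 : Int))).length = w.toNat := by
    rw [List.length_append, hlenp, List.length_map, List.length_range]; omega
  unfold prow
  by_cases hp : PySem.Int.mod floor 2 = 0
  · rw [if_neg (by simpa using hp), if_pos hp]; exact hnum c hc
  · rw [if_pos (by simpa using hp), if_neg hp, getD_reverse _ _ (by rw [hlen]; omega), hlen,
      hnum _ (by omega), (by omega : ((w.toNat - 1 - c : Nat) : Int) = w - 1 - (c : Int))]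

lemma rowScan_none (box : List (List Int)) (num c : Int) (rs : List Int) (d : Int)
    (h : ∀ r ∈ rs, PySem.List.pyGetD (PySem.List.pyGetD box r []) c 0 ≠ num) :
    rowScan box num c rs d = none := by
  induction rs generalizing d with
  | nil => rfl
  | cons r rest ih =>
    rw [rowScan, if_neg (h r (by simp))]
    exact ih _ (fun x hx => h x (by simp [hx]))

lemma rowScan_skip (box : List (List Int)) (num c : Int) (rs1 rs2 : List Int) (d : Int)
    (h : ∀ r ∈ rs1, PySem.List.pyGetD (PySem.List.pyGetD box r []) c 0 ≠ num) :
    rowScan box num c (rs1 ++ rs2) d =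
      rowScan box num c rs2
        (d + (rs1.countP (fun r => decide (PySem.List.pyGetD (PySem.List.pyGetD box r []) c 0 ≠ 0)) : Int)) := by
  induction rs1 generalizing d with
  | nil => simp
  | cons r rest ih =>
    rw [List.cons_append, rowScan, if_neg (h r (by simp)), ih _ (fun x hx => h x (by simp [hx]))]
    by_cases hz : PySem.List.pyGetD (PySem.List.pyGetD box r []) c 0 ≠ 0
    · rw [if_pos hz, List.countP_cons_of_pos (by simpa using hz)]
      congr 1; push_cast; ring
    · rw [if_neg hz, List.countP_cons_of_neg (by simpa using hz)]

lemma rowScan_found (box : List (List Int)) (num c r : Int) (rs : List Int) (d : Int)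
    (h : PySem.List.pyGetD (PySem.List.pyGetD box r []) c 0 = num) (hnz : num ≠ 0) :
    rowScan box num c (r :: rs) d = some (d + 1) := by
  rw [rowScan, if_pos h, if_pos (by rw [h]; exact hnz)]

lemma colScan_skip (box : List (List Int)) (num R : Int) (cs1 cs2 : List Int)
    (h : ∀ c ∈ cs1, rowScan box num c (PySem.List.pyRange 0 R) 0 = none) :
    colScan box num R (cs1 ++ cs2) = colScan box num R cs2 := by
  induction cs1 with
  | nil => simp
  | cons c rest ih =>
    rw [List.cons_append, colScan, h c (by simp)]
    exact ih (fun x hx => h x (by simp [hx]))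


-- the heart: A's column scan over the zigzag grid returns exactly B's closed-form value
lemma scan_main (w num fl ct r0 k0 : Int) (hw : 1 ≤ w) (h1 : 1 ≤ num)
    (hct0 : 0 ≤ ct) (hctw : ct < w) (hfl0 : 0 ≤ fl)
    (hkey : num - 1 = r0 * w + k0) (hk0 : 0 ≤ k0) (hk0w : k0 < w) (hr00 : 0 ≤ r0)
    (hle : num ≤ fl * w + ct) :
    colScan (gridRows w fl ct).reverse num (if ct = 0 then fl else fl + 1) (PySem.List.pyRange 0 w)
      = some (if 0 < ct then
                (if (if PySem.Int.mod fl 2 = 0 then (if PySem.Int.mod r0 2 = 0 then k0 else w - 1 - k0)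
                     else w - 1 - (if PySem.Int.mod r0 2 = 0 then k0 else w - 1 - k0)) < ct
                 then (if r0 < fl then fl - r0 else 0) + 1 else (if r0 < fl then fl - r0 else 0))
              else (if r0 < fl then fl - r0 else 0)) := by
  have hwpos : (0 : Int) < w := by omega
  -- replace fl and r0 by casts of naturals
  obtain ⟨F, hF⟩ : ∃ F : Nat, fl = (F : Int) := ⟨fl.toNat, (Int.toNat_of_nonneg hfl0).symm⟩
  subst hF
  obtain ⟨ri, hri⟩ : ∃ ri : Nat, r0 = (ri : Int) := ⟨r0.toNat, (Int.toNat_of_nonneg hr00).symm⟩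
  subst hri
  have hmodF : PySem.Int.mod ((F : Nat) : Int) 2 = ((F % 2 : Nat) : Int) := PySem.Int.mod_natCast F 2
  have hmodr : PySem.Int.mod ((ri : Nat) : Int) 2 = ((ri % 2 : Nat) : Int) := PySem.Int.mod_natCast ri 2
  have hr0fl : (ri : Int) ≤ (F : Int) := by
    have h2 : (ri : Int) * w < ((F : Int) + 1) * w := by linarith
    have := lt_of_mul_lt_mul_right h2 (le_of_lt hwpos)
    omega
  have hct_r0 : ct = 0 → (ri : Int) < (F : Int) := by
    intro h0
    have h2 : (ri : Int) * w < (F : Int) * w := by linarith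
    exact lt_of_mul_lt_mul_right h2 (le_of_lt hwpos)
  have hr0fl_k : (ri : Int) = (F : Int) → k0 < ct := by
    intro h; rw [h] at hkey; linarith
  set c0 : Int := if PySem.Int.mod ((ri : Nat) : Int) 2 = 0 then k0 else w - 1 - k0 with hc0def
  have hc0b : 0 ≤ c0 ∧ c0 < w := by rw [hc0def]; split <;> omega
  set R : Int := if ct = 0 then ((F : Nat) : Int) else ((F : Nat) : Int) + 1 with hRdef
  have hRF : ((F : Nat) : Int) ≤ R ∧ R ≤ ((F : Nat) : Int) + 1 ∧ (ct = 0 → R = ((F : Nat) : Int)) ∧ (0 < ct → R = ((F : Nat) : Int) + 1) := by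
    rw [hRdef]; refine ⟨by split <;> omega, by split <;> omega, fun h => by rw [if_pos h], fun h => by rw [if_neg (by omega)]⟩
  set L : Nat := (gridRows w ((F : Nat) : Int) ct).length with hLdef
  have hL : (L : Int) = R := by
    rw [hLdef]; unfold gridRows
    by_cases hct : ct = 0
    · rw [if_neg (by omega), (hRF.2.2.1 hct)]; simp
    · rw [if_pos (by omega), (hRF.2.2.2 (by omega))]; simp
  have hentry : ∀ (r c : Int), 0 ≤ r → r < R → 0 ≤ c →
      PySem.List.pyGetD (PySem.List.pyGetD (gridRows w ((F : Nat) : Int) ct).reverse r []) c 0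
        = ((gridRows w ((F : Nat) : Int) ct).getD (L - 1 - r.toNat) []).getD c.toNat 0 := by
    intro r c hr hrR hc
    have hrL : r.toNat < L := by omega
    rw [PySem.List.pyGetD_eq_getElem _ _ hr (by rw [List.length_reverse, ← hLdef]; omega),
      PySem.List.pyGetD_of_nonneg _ _ hc, List.getElem_reverse,
      ← List.getD_eq_getElem _ [] (by rw [← hLdef]; omega), ← hLdef]
  have hrowfull : ∀ idx : Nat, idx < F → (gridRows w ((F : Nat) : Int) ct).getD idx [] = rowAt w idx := by
    intro idx hidx
    unfold gridRows
    rw [List.getD_append _ _ _ _ (by simpa using hidx),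
      List.getD_eq_getElem _ _ (by simpa using hidx), List.getElem_map, List.getElem_range]
  have hrowtop : 0 < ct → (gridRows w ((F : Nat) : Int) ct).getD F [] = prow w ((F : Nat) : Int) ct := by
    intro h
    unfold gridRows
    rw [if_pos h, List.getD_append_right _ _ _ _ (by simp)]
    simp
  have hvalfull : ∀ (idx c : Nat), idx < F → (c : Int) < w →
      ((gridRows w ((F : Nat) : Int) ct).getD idx []).getD c 0
        = if idx % 2 = 0 then (idx : Int) * w + 1 + c else (idx : Int) * w + w - c := by
    intro idx c hi hc; rw [hrowfull idx hi, rowAt_getD w hw idx c hc]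
  have hvaltop : 0 < ct → ∀ c : Nat, (c : Int) < w →
      ((gridRows w ((F : Nat) : Int) ct).getD F []).getD c 0
        = if PySem.Int.mod ((F : Nat) : Int) 2 = 0 then (if (c : Int) < ct then ((F : Nat) : Int) * w + 1 + c else 0)
          else (if w - 1 - c < ct then ((F : Nat) : Int) * w + 1 + (w - 1 - c) else 0) := by
    intro h c hc; rw [hrowtop h, prow_getD w ((F : Nat) : Int) ct hw h (by omega) c hc]
  -- no cell other than (row ri, column c0) holds num
  have hne : ∀ (r c : Int), 0 ≤ r → r < R → 0 ≤ c → c < w → (r ≠ R - 1 - (ri : Int) ∨ c ≠ c0) →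
      PySem.List.pyGetD (PySem.List.pyGetD (gridRows w ((F : Nat) : Int) ct).reverse r []) c 0 ≠ num := by
    intro r c hr hrR hc hcw' hor
    rw [hentry r c hr hrR hc]
    obtain ⟨cN, hcN⟩ : ∃ cN : Nat, c.toNat = cN := ⟨c.toNat, rfl⟩
    have hcNc : (cN : Int) = c := by omega
    rw [hcN]
    by_cases hcase : L - 1 - r.toNat < F
    · rw [hvalfull _ cN hcase (by omega)]
      by_cases hp : (L - 1 - r.toNat) % 2 = 0
      · rw [if_pos hp]; intro heq
        have heq2 : ((L - 1 - r.toNat : Nat) : Int) * w + (cN : Int) = (ri : Int) * w + k0 := by linarith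
        obtain ⟨hie, hce⟩ := div_unique hwpos (by omega) (by omega) hk0 hk0w heq2
        have hc0k : c0 = k0 := by
          rw [hc0def, hmodr, if_pos (by omega)]
        rcases hor with h | h
        · exact h (by omega)
        · exact h (by omega)
      · rw [if_neg hp]; intro heq
        have heq2 : ((L - 1 - r.toNat : Nat) : Int) * w + (w - 1 - (cN : Int)) = (ri : Int) * w + k0 := by linarith
        obtain ⟨hie, hce⟩ := div_unique hwpos (by omega) (by omega) hk0 hk0w heq2
        have hc0k : c0 = w - 1 - k0 := by
          rw [hc0def, hmodr, if_neg (by omega)]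
        rcases hor with h | h
        · exact h (by omega)
        · exact h (by omega)
    · have hctpos : 0 < ct := by
        by_contra hcc
        have h0 : ct = 0 := by omega
        have := hRF.2.2.1 h0
        omega
      have hidxF : L - 1 - r.toNat = F := by
        have := hRF.2.2.2 hctpos
        omega
      rw [hidxF, hvaltop hctpos cN (by omega)]
      by_cases hp : F % 2 = 0
      · rw [hmodF, if_pos (by omega)]
        by_cases hin : (cN : Int) < ct
        · rw [if_pos hin]; intro heq
          have heq2 : ((F : Nat) : Int) * w + (cN : Int) = (ri : Int) * w + k0 := by linarith
          obtain ⟨hie, hce⟩ := div_unique hwpos (by omega) (by omega) hk0 hk0w heq2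
          have hc0k : c0 = k0 := by
            rw [hc0def, hmodr, if_pos (by omega)]
          rcases hor with h | h
          · exact h (by omega)
          · exact h (by omega)
        · rw [if_neg hin]; omega
      · rw [hmodF, if_neg (by omega)]
        by_cases hin : w - 1 - (cN : Int) < ct
        · rw [if_pos hin]; intro heq
          have heq2 : ((F : Nat) : Int) * w + (w - 1 - (cN : Int)) = (ri : Int) * w + k0 := by linarith
          obtain ⟨hie, hce⟩ := div_unique hwpos (by omega) (by omega) hk0 hk0w heq2
          have hc0k : c0 = w - 1 - k0 := by
            rw [hc0def, hmodr, if_neg (by omega)]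
          rcases hor with h | h
          · exact h (by omega)
          · exact h (by omega)
        · rw [if_neg hin]; omega
  -- the cell (row ri, column c0) holds num
  have hrm0 : 0 ≤ R - 1 - (ri : Int) := by
    by_cases hct : ct = 0
    · have := hRF.2.2.1 hct; have := hct_r0 hct; omega
    · have := hRF.2.2.2 (by omega); omega
  have hmatch : PySem.List.pyGetD (PySem.List.pyGetD (gridRows w ((F : Nat) : Int) ct).reverse (R - 1 - (ri : Int)) []) c0 0 = num := by
    rw [hentry _ _ hrm0 (by omega) hc0b.1]
    have hidx : L - 1 - (R - 1 - (ri : Int)).toNat = ri := by omega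
    rw [hidx]
    obtain ⟨cm, hcm⟩ : ∃ cm : Nat, (cm : Int) = c0 := ⟨c0.toNat, Int.toNat_of_nonneg hc0b.1⟩
    rw [show c0.toNat = cm from by omega]
    by_cases hcase : ri < F
    · rw [hvalfull ri cm hcase (by omega)]
      by_cases hp : ri % 2 = 0
      · rw [if_pos hp]
        have : c0 = k0 := by rw [hc0def, hmodr, if_pos (by omega)]
        linarith [hkey]
      · rw [if_neg hp]
        have : c0 = w - 1 - k0 := by rw [hc0def, hmodr, if_neg (by omega)]
        linarith [hkey]
    · have hriF : ri = F := by omega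
      have hctpos : 0 < ct := by
        by_contra hcc
        have h0 : ct = 0 := by omega
        have := hct_r0 h0; omega
      have hkct : k0 < ct := hr0fl_k (by omega)
      subst hriF
      rw [hvaltop hctpos cm (by omega), hmodF]
      by_cases hp : ri % 2 = 0
      · have : c0 = k0 := by rw [hc0def, hmodr, if_pos (by omega)]
        rw [if_pos (by omega), if_pos (by omega)]
        linarith [hkey]
      · have : c0 = w - 1 - k0 := by rw [hc0def, hmodr, if_neg (by omega)]
        rw [if_neg (by omega), if_pos (by omega)]
        linarith [hkey]
  -- full rows above the match are all non-zero
  have hnzfull : ∀ (r : Int), 0 ≤ r → r < R → L - 1 - r.toNat < F →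
      PySem.List.pyGetD (PySem.List.pyGetD (gridRows w ((F : Nat) : Int) ct).reverse r []) c0 0 ≠ 0 := by
    intro r hr hrR hidx
    rw [hentry r c0 hr hrR hc0b.1]
    obtain ⟨cm, hcm⟩ : ∃ cm : Nat, (cm : Int) = c0 := ⟨c0.toNat, Int.toNat_of_nonneg hc0b.1⟩
    rw [show c0.toNat = cm from by omega, hvalfull _ cm hidx (by omega)]
    have hnn : 0 ≤ ((L - 1 - r.toNat : Nat) : Int) * w := mul_nonneg (by omega) (by omega)
    split <;> omega
  -- assemble the scan
  apply Eq.trans (b := some ((0 : Int) +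
      ((PySem.List.pyRange 0 (R - 1 - (ri : Int))).countP
        (fun r => decide (PySem.List.pyGetD (PySem.List.pyGetD (gridRows w ((F : Nat) : Int) ct).reverse r []) c0 0 ≠ 0)) : Int) + 1))
  · rw [PySem.List.pyRange_one_append 0 c0 w hc0b.1 (le_of_lt hc0b.2),
      colScan_skip _ _ _ _ _ (fun c hcmem => by
        rw [PySem.List.mem_pyRange_one] at hcmem
        exact rowScan_none _ _ _ _ _ (fun r hrmem => by
          rw [PySem.List.mem_pyRange_one] at hrmem
          exact hne r c hrmem.1 hrmem.2 hcmem.1 (by omega) (Or.inr (by omega)))),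
      PySem.List.pyRange_one_cons hc0b.2, colScan,
      PySem.List.pyRange_one_append 0 (R - 1 - (ri : Int)) R hrm0 (by omega),
      rowScan_skip _ _ _ _ _ _ (fun r hrmem => by
        rw [PySem.List.mem_pyRange_one] at hrmem
        exact hne r c0 hrmem.1 (by omega) hc0b.1 hc0b.2 (Or.inl (by omega))),
      PySem.List.pyRange_one_cons (by omega : R - 1 - (ri : Int) < R),
      rowScan_found _ _ _ _ _ _ hmatch (by omega)]
  · -- compute the count
    refine congrArg some ?_
    by_cases hct : ct = 0
    · have hRFeq := hRF.2.2.1 hct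
      have hcnt : (PySem.List.pyRange 0 (R - 1 - (ri : Int))).countP
          (fun r => decide (PySem.List.pyGetD (PySem.List.pyGetD (gridRows w ((F : Nat) : Int) ct).reverse r []) c0 0 ≠ 0))
          = (PySem.List.pyRange 0 (R - 1 - (ri : Int))).length := by
        rw [List.countP_eq_length]
        intro r hrmem
        rw [PySem.List.mem_pyRange_one] at hrmem
        simp only [decide_eq_true_eq]
        exact hnzfull r hrmem.1 (by omega) (by omega)
      rw [hcnt, PySem.List.length_pyRange_one, if_neg (by omega : ¬ 0 < ct),
        if_pos (hct_r0 hct)]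
      omega
    · have hctpos : 0 < ct := by omega
      have hRFeq := hRF.2.2.2 hctpos
      by_cases hriF : (ri : Int) = (F : Nat)
      · -- num sits in the partial top row
        have hkct : k0 < ct := hr0fl_k (by omega)
        rw [show R - 1 - (ri : Int) = 0 from by omega, PySem.List.pyRange_one_eq_nil (by omega),
          List.countP_nil, if_pos hctpos, if_pos ?_, if_neg (by omega)]
        · norm_num
        · rw [hc0def, hmodr, hmodF]
          by_cases hp : ri % 2 = 0
          · rw [if_pos (by omega), if_pos (by omega)]; omega
          · rw [if_neg (by omega), if_neg (by omega)]; omega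
      · -- num sits in a full row strictly below the partial top row
        have hrilt : (ri : Int) < (F : Nat) := by omega
        have hsplit : PySem.List.pyRange 0 (R - 1 - (ri : Int)) = 0 :: PySem.List.pyRange 1 (R - 1 - (ri : Int)) :=
          PySem.List.pyRange_one_cons (by omega)
        have hcnt2 : (PySem.List.pyRange 1 (R - 1 - (ri : Int))).countP
            (fun r => decide (PySem.List.pyGetD (PySem.List.pyGetD (gridRows w ((F : Nat) : Int) ct).reverse r []) c0 0 ≠ 0))
            = (PySem.List.pyRange 1 (R - 1 - (ri : Int))).length := by
          rw [List.countP_eq_length]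
          intro r hrmem
          rw [PySem.List.mem_pyRange_one] at hrmem
          simp only [decide_eq_true_eq]
          exact hnzfull r (by omega) (by omega) (by omega)
        set pos : Int := if PySem.Int.mod ((F : Nat) : Int) 2 = 0 then c0 else w - 1 - c0 with hposdef
        have hposb : 0 ≤ pos := by rw [hposdef]; split <;> omega
        have hv0 : PySem.List.pyGetD (PySem.List.pyGetD (gridRows w ((F : Nat) : Int) ct).reverse 0 []) c0 0
            = (if pos < ct then ((F : Nat) : Int) * w + 1 + pos else 0) := by
          rw [hentry 0 c0 (by omega) (by omega) hc0b.1,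
            show L - 1 - (0 : Int).toNat = F from by omega]
          obtain ⟨cm, hcm⟩ : ∃ cm : Nat, (cm : Int) = c0 := ⟨c0.toNat, Int.toNat_of_nonneg hc0b.1⟩
          rw [show c0.toNat = cm from by omega, hvaltop hctpos cm (by omega)]
          rw [hposdef, hmodF]
          by_cases hp : F % 2 = 0
          · have hcond : ((F % 2 : Nat) : Int) = 0 := by omega
            rw [if_pos hcond, if_pos hcond, hcm]
          · have hcond : ¬ (((F % 2 : Nat) : Int) = 0) := by omega
            rw [if_neg hcond, if_neg hcond, hcm]
        have hFw : (0 : Int) ≤ ((F : Nat) : Int) * w := mul_nonneg (by omega) (by omega)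
        rw [hsplit]
        by_cases hpos : pos < ct
        · rw [List.countP_cons_of_pos (by simp only [decide_eq_true_eq, hv0, if_pos hpos]; omega),
            hcnt2, PySem.List.length_pyRange_one, if_pos hpos, if_pos hrilt]
          omega
        · rw [List.countP_cons_of_neg (by simp only [decide_eq_true_eq, hv0, if_neg hpos]; omega),
            hcnt2, PySem.List.length_pyRange_one, if_neg hpos, if_pos hrilt]
          omega

-- with num = 0 the scan stops at the first padding zero of the partial top row, at depth 0
lemma scan_zero (w ct : Int) (fl : Int) (hw : 1 ≤ w) (hct : 0 < ct) (hctw : ct < w) (hfl0 : 0 ≤ fl) :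
    colScan (gridRows w fl ct).reverse 0 (fl + 1) (PySem.List.pyRange 0 w) = some 0 := by
  have hwpos : (0 : Int) < w := by omega
  obtain ⟨F, hF⟩ : ∃ F : Nat, fl = (F : Int) := ⟨fl.toNat, (Int.toNat_of_nonneg hfl0).symm⟩
  subst hF
  have hL : (gridRows w ((F : Nat) : Int) ct).length = F + 1 := by
    unfold gridRows
    rw [if_pos (by omega)]
    simp
  have hentry : ∀ (r c : Int), 0 ≤ r → r < (F : Int) + 1 → 0 ≤ c →
      PySem.List.pyGetD (PySem.List.pyGetD (gridRows w ((F : Nat) : Int) ct).reverse r []) c 0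
        = ((gridRows w ((F : Nat) : Int) ct).getD (F - r.toNat) []).getD c.toNat 0 := by
    intro r c hr hrR hc
    rw [PySem.List.pyGetD_eq_getElem _ _ hr (by rw [List.length_reverse, hL]; omega),
      PySem.List.pyGetD_of_nonneg _ _ hc, List.getElem_reverse,
      ← List.getD_eq_getElem _ [] (by rw [hL]; omega), hL,
      show F + 1 - 1 - r.toNat = F - r.toNat from by omega]
  have hrowtop : (gridRows w ((F : Nat) : Int) ct).getD F [] = prow w ((F : Nat) : Int) ct := by
    unfold gridRows
    rw [if_pos (by omega), List.getD_append_right _ _ _ _ (by simp)]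
    simp
  have hrowfull : ∀ idx : Nat, idx < F → (gridRows w ((F : Nat) : Int) ct).getD idx [] = rowAt w idx := by
    intro idx hidx
    unfold gridRows
    rw [List.getD_append _ _ _ _ (by simpa using hidx),
      List.getD_eq_getElem _ _ (by simpa using hidx), List.getElem_map, List.getElem_range]
  have htop : ∀ c : Int, 0 ≤ c → c < w →
      PySem.List.pyGetD (PySem.List.pyGetD (gridRows w ((F : Nat) : Int) ct).reverse 0 []) c 0
        = (if PySem.Int.mod ((F : Nat) : Int) 2 = 0 then (if c < ct then ((F : Nat) : Int) * w + 1 + c else 0)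
           else (if w - 1 - c < ct then ((F : Nat) : Int) * w + 1 + (w - 1 - c) else 0)) := by
    intro c hc hcw
    rw [hentry 0 c (by omega) (by omega) hc, show F - (0 : Int).toNat = F from by omega, hrowtop]
    obtain ⟨cm, hcm⟩ : ∃ cm : Nat, (cm : Int) = c := ⟨c.toNat, Int.toNat_of_nonneg hc⟩
    rw [show c.toNat = cm from by omega,
      prow_getD w ((F : Nat) : Int) ct hw hct (by omega) cm (by omega), hcm]
  have hfull : ∀ (r c : Int), 1 ≤ r → r < (F : Int) + 1 → 0 ≤ c → c < w →
      PySem.List.pyGetD (PySem.List.pyGetD (gridRows w ((F : Nat) : Int) ct).reverse r []) c 0 ≠ 0 := by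
    intro r c hr hrR hc hcw
    rw [hentry r c (by omega) hrR hc]
    have hidx : F - r.toNat < F := by omega
    rw [hrowfull _ hidx]
    obtain ⟨cm, hcm⟩ : ∃ cm : Nat, (cm : Int) = c := ⟨c.toNat, Int.toNat_of_nonneg hc⟩
    rw [show c.toNat = cm from by omega, rowAt_getD w hw _ cm (by omega)]
    have hnn : 0 ≤ ((F - r.toNat : Nat) : Int) * w := mul_nonneg (by omega) (by omega)
    split <;> omega
  set cz : Int := if PySem.Int.mod ((F : Nat) : Int) 2 = 0 then ct else 0 with hczdef
  have hczb : 0 ≤ cz ∧ cz < w := by rw [hczdef]; split <;> omega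
  have htopz : PySem.List.pyGetD (PySem.List.pyGetD (gridRows w ((F : Nat) : Int) ct).reverse 0 []) cz 0 = 0 := by
    by_cases hp : PySem.Int.mod ((F : Nat) : Int) 2 = 0
    · have hcze : cz = ct := by rw [hczdef, if_pos hp]
      rw [htop cz hczb.1 hczb.2, if_pos hp, hcze, if_neg (by omega)]
    · have hcze : cz = 0 := by rw [hczdef, if_neg hp]
      rw [htop cz hczb.1 hczb.2, if_neg hp, hcze, if_neg (by omega)]
  have hskip : ∀ c ∈ PySem.List.pyRange 0 cz,
      rowScan (gridRows w ((F : Nat) : Int) ct).reverse 0 c (PySem.List.pyRange 0 ((F : Int) + 1)) 0 = none := by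
    intro c hcmem
    rw [PySem.List.mem_pyRange_one] at hcmem
    have hp : PySem.Int.mod ((F : Nat) : Int) 2 = 0 := by
      by_contra hpc
      have : cz = 0 := by rw [hczdef, if_neg hpc]
      omega
    have hcct : c < ct := by
      have : cz = ct := by rw [hczdef, if_pos hp]
      omega
    apply rowScan_none
    intro r hrmem
    rw [PySem.List.mem_pyRange_one] at hrmem
    by_cases hr0 : r = 0
    · subst hr0
      rw [htop c hcmem.1 (by omega), if_pos hp, if_pos hcct]
      have hnn : 0 ≤ ((F : Nat) : Int) * w := mul_nonneg (by omega) (by omega)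
      omega
    · exact hfull r c (by omega) hrmem.2 hcmem.1 (by omega)
  rw [PySem.List.pyRange_one_append 0 cz w hczb.1 (le_of_lt hczb.2),
    colScan_skip _ _ _ _ _ hskip, PySem.List.pyRange_one_cons hczb.2, colScan,
    PySem.List.pyRange_one_cons (by omega : (0 : Int) < (F : Int) + 1), rowScan,
    if_pos htopz, htopz]
  simp

-- A's grid, as `solution` builds it after buildA, equals gridRows
lemma boxEq (w : Int) (F : Nat) (ct : Int) :
    (if ct > 0 then
      (List.range F).map (rowAt w) ++
        [if PySem.Int.mod ((F : Nat) : Int) 2 ≠ 0 then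
           (PySem.List.pyRange (((F : Nat) : Int) * w + 1) (((F : Nat) : Int) * w + 1 + ct)
             ++ (List.range (w - ct).toNat).map (fun _ => (0 : Int))).reverse
         else PySem.List.pyRange (((F : Nat) : Int) * w + 1) (((F : Nat) : Int) * w + 1 + ct)
             ++ (List.range (w - ct).toNat).map (fun _ => (0 : Int))]
    else (List.range F).map (rowAt w)) = gridRows w ((F : Nat) : Int) ct := by
  unfold gridRows prow
  rw [Int.toNat_natCast]
  by_cases h : 0 < ct
  · rw [if_pos h, if_pos h]
  · rw [if_neg h, if_neg h, List.append_nil]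

-- ===== VERDICT (by name: the statement is the Claim_ definition above) =====
theorem solution_spec : Claim_equal_solution := by
  intro n w num hdom hpre
  unfold Spec_solution
  obtain ⟨hw, h0, hn, hmod0⟩ := hpre
  have hw0 : w ≠ 0 := by omega
  have hwpos : (0 : Int) < w := by omega
  have hdm : PySem.Int.divmod? n w = some (n / w, n % w) := by
    unfold PySem.Int.divmod?
    rw [if_neg hw0,
      show n.fdiv w = n / w from PySem.Int.floordiv_eq_ediv_of_pos hwpos,
      show n.fmod w = n % w from PySem.Int.mod_eq_emod_of_pos hwpos]
  have hfl0 : 0 ≤ n / w := Int.ediv_nonneg (by omega) (by omega)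
  have hct0 : 0 ≤ n % w := Int.emod_nonneg n hw0
  have hctw : n % w < w := Int.emod_lt_of_pos n hwpos
  have hid : n = (n / w) * w + n % w := by
    have := Int.ediv_add_emod n w
    linarith
  obtain ⟨F, hF⟩ : ∃ F : Nat, n / w = (F : Int) := ⟨(n / w).toNat, (Int.toNat_of_nonneg hfl0).symm⟩
  by_cases hz : num = 0
  · -- num = 0: A's scan stops at the first padding zero, B returns 0 directly
    subst hz
    have hct : 0 < n % w := by
      have he : PySem.Int.mod n w = n % w := PySem.Int.mod_eq_emod_of_pos hwpos
      have := hmod0 rfl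
      rw [he] at this
      omega
    have hB : solution_alt n w 0 = 0 := by
      unfold solution_alt
      rw [if_neg (by omega), if_pos rfl]
    rw [hB]
    unfold solution
    simp only [hdm, hF]
    rw [buildA w F]
    simp only []
    rw [boxEq w F (n % w), if_neg (by omega : ¬ n % w = 0),
      scan_zero w (n % w) ((F : Nat) : Int) hw hct hctw (by omega)]
  · -- 1 ≤ num: both compute B's closed-form depth
    have h1 : 1 ≤ num := by omega
    have hdm2 : PySem.Int.divmod? (num - 1) w = some ((num - 1) / w, (num - 1) % w) := by
      unfold PySem.Int.divmod?
      rw [if_neg hw0,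
        show (num - 1).fdiv w = (num - 1) / w from PySem.Int.floordiv_eq_ediv_of_pos hwpos,
        show (num - 1).fmod w = (num - 1) % w from PySem.Int.mod_eq_emod_of_pos hwpos]
    have hr00 : 0 ≤ (num - 1) / w := Int.ediv_nonneg (by omega) (by omega)
    have hk00 : 0 ≤ (num - 1) % w := Int.emod_nonneg _ hw0
    have hk0w : (num - 1) % w < w := Int.emod_lt_of_pos _ hwpos
    have hkey : num - 1 = ((num - 1) / w) * w + (num - 1) % w := by
      have := Int.ediv_add_emod (num - 1) w
      linarith
    have halt : solution_alt n w num =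
        (if 0 < n % w then
          (if (if PySem.Int.mod (n / w) 2 = 0 then
                  (if PySem.Int.mod ((num - 1) / w) 2 = 0 then (num - 1) % w else w - 1 - (num - 1) % w)
                else w - 1 - (if PySem.Int.mod ((num - 1) / w) 2 = 0 then (num - 1) % w else w - 1 - (num - 1) % w)) < n % w
           then (if (num - 1) / w < n / w then n / w - (num - 1) / w else 0) + 1
           else (if (num - 1) / w < n / w then n / w - (num - 1) / w else 0))
         else (if (num - 1) / w < n / w then n / w - (num - 1) / w else 0)) := by
      unfold solution_alt
      rw [if_neg (by omega), if_neg hz, hdm, hdm2]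
    rw [halt]
    unfold solution
    simp only [hdm, hF]
    rw [buildA w F]
    simp only []
    rw [boxEq w F (n % w), scan_main w num ((F : Nat) : Int) (n % w) ((num - 1) / w) ((num - 1) % w)
      hw h1 hct0 hctw (by omega) hkey hk00 hk0w hr00 (by rw [← hF]; linarith [hid])]
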